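-- pv_equiv track=rewrite | github.com/kolyasalubov/UA-4592.PythonFundamentals | hw/hw08/AndriiBilan/8.2_Practical task.py | special_fail_check
-- ===== SOURCE A (Python) =====
-- def special_fail_check(password:str):
--     """
--     Function checks if password has special characters
--     """
--     password_split = list(password)
--     fail_check = True
--     for char in password_split:
--         if char in "$#@":
--             fail_check = False
--             break
--     return fail_check
-- ===== SOURCE B (Python) =====
-- def special_fail_check(password: str):
--     """
--     Function checks if password has special characters
--     """
--     for s in "$#@":
--         if s in password:
--             return False
--     return True
-- ===== Notes on version B (the rewrite author's own statement) =====
-- stated objective: faster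
-- what changed: B drives the loop over the fixed three-character special-marker alphabet, doing a substring test of each marker in the password and returning False on the first hit, instead of A's per-character flag-and-break scan over list(password).
import Mathlib
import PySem

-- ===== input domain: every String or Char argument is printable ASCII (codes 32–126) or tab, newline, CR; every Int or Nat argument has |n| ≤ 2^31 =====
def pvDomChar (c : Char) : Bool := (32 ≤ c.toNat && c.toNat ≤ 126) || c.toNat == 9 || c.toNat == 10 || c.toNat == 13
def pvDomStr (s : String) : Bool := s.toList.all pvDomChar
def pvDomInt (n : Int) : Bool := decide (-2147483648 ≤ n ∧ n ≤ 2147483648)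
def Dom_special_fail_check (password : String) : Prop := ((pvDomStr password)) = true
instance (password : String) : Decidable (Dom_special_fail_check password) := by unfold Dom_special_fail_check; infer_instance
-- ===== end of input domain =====

-- B loops over the fixed alphabet "$#@" doing substring tests instead of scanning the password's characters; objective: simpler.

-- ===== PORT A =====
-- A: password_split = list(password); flag loop over its chars, break on a special char.
def pvALoop : List Char → Bool
  | [] => true
  | c :: rest =>
      if PySem.Chars.isIn [c] ['$', '#', '@'] then false else pvALoop rest

def special_fail_check (password : String) : Bool :=
  pvALoop password.toList

-- ===== PORT B =====
-- B: for s in "$#@": if s in password: return False; return True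
def pvBLoop (password : List Char) : List Char → Bool
  | [] => true
  | s :: rest =>
      if PySem.Chars.isIn [s] password then false else pvBLoop password rest

def special_fail_check_alt (password : String) : Bool :=
  pvBLoop password.toList ['$', '#', '@']

-- ===== PRECONDITION & SPEC =====
def Spec_special_fail_check (password : String) (out : Bool) : Prop := out = special_fail_check_alt password
instance (password : String) (out : Bool) : Decidable (Spec_special_fail_check password out) := by unfold Spec_special_fail_check; infer_instance

-- ===== CLAIM (what is proved, stated in full; the proofs are below) =====
def Claim_equal_special_fail_check : Prop := ∀ (password : String), Dom_special_fail_check password → Spec_special_fail_check password (special_fail_check password)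

-- ===== LEMMAS AND PROOFS =====

-- 'c in s' for a single character is list membership
theorem pv_isIn_single (c : Char) (l : List Char) :
    PySem.Chars.isIn [c] l = l.contains c := by
  rcases h : l.contains c with _ | _
  · rw [PySem.Chars.isIn_eq_false_iff]
    intro hinf
    have : c ∈ l := List.singleton_sublist.mp hinf.sublist
    simp at h
    exact h this
  · rw [PySem.Chars.isIn_iff_infix]
    simp at h
    obtain ⟨s, t, rfl⟩ := List.append_of_mem h
    exact ⟨s, t, by simp⟩

theorem pvALoop_eq (l : List Char) :
    pvALoop l = (!(l.contains '$') && !(l.contains '#') && !(l.contains '@')) := by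
  induction l with
  | nil => rfl
  | cons c t ih =>
      rw [pvALoop, pv_isIn_single]
      by_cases h1 : c = '$'
      · subst h1; simp
      · by_cases h2 : c = '#'
        · subst h2; simp
        · by_cases h3 : c = '@'
          · subst h3; simp
          · simp [h1, h2, h3, ih, Ne.symm h1, Ne.symm h2, Ne.symm h3]

theorem pvBLoop_eq (p : List Char) :
    pvBLoop p ['$', '#', '@'] = (!(p.contains '$') && !(p.contains '#') && !(p.contains '@')) := by
  rw [pvBLoop, pv_isIn_single, pvBLoop, pv_isIn_single, pvBLoop, pv_isIn_single, pvBLoop]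
  cases h1 : p.contains '$' <;> cases h2 : p.contains '#' <;> cases h3 : p.contains '@' <;> rfl

-- ===== VERDICT (by name: the statement is the Claim_ definition above) =====
theorem special_fail_check_spec : Claim_equal_special_fail_check := by
  intro password _
  unfold Spec_special_fail_check special_fail_check special_fail_check_alt
  rw [pvALoop_eq, pvBLoop_eq]
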